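-- pv_equiv track=rewrite | github.com/aloeliger/anomalyTriggerSkunkworks | scripts/newFramework/other/parseTestVectorsToTestPatterns.py | formEvents
-- ===== SOURCE A (Python) =====
-- def formEvents(fileContents):
--     eventGroups = []
--     for i in range(len(fileContents)//4):
--         eventGroups.append(
--             [
--                 fileContents[i*4],
--                 fileContents[(i*4)+1],
--                 fileContents[(i*4)+2],
--                 fileContents[(i*4)+3],
--             ]
--         )
--     return eventGroups
-- ===== SOURCE B (Python) =====
-- def formEvents(fileContents):
--     # Two staged halvings: first pair up adjacent elements, then pair up
--     # adjacent pairs; any trailing partial group is dropped at each stage.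
--     pairs = [fileContents[i:i + 2] for i in range(0, len(fileContents) - 1, 2)]
--     return [pairs[j] + pairs[j + 1] for j in range(0, len(pairs) - 1, 2)]
-- ===== Notes on version B (the rewrite author's own statement) =====
-- stated objective: alternative
-- what changed: Replaces A's single indexed loop (len//4 iterations, four indexed reads each) with two staged passes: a first comprehension pairs adjacent elements into 2-lists, a second comprehension concatenates adjacent pairs into 4-lists; partial groups are dropped at each stage.
import Mathlib
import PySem

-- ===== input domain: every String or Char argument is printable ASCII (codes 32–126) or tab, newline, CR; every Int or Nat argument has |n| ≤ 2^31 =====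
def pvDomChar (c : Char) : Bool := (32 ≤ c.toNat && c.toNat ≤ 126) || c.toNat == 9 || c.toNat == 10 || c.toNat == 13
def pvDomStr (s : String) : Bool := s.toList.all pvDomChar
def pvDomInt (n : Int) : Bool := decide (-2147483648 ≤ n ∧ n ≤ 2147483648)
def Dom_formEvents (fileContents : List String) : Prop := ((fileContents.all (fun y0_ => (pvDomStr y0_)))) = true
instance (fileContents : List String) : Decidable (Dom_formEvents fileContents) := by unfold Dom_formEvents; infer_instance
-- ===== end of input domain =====

-- B groups into fours by two staged halvings (pair adjacent elements, then concatenate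
-- adjacent pairs) instead of A's single index-arithmetic loop; alternative decomposition.

-- ===== PORT A =====
-- for i in range(len(fileContents)//4): append the four elements at indices 4i..4i+3
def formEvents (fileContents : List String) : List (List String) :=
  (PySem.List.pyRange 0 (PySem.Int.floordiv (fileContents.length : Int) 4) 1).foldl
    (fun eventGroups i =>
      eventGroups ++
        [[PySem.List.pyGetD fileContents (i * 4) "",
          PySem.List.pyGetD fileContents (i * 4 + 1) "",
          PySem.List.pyGetD fileContents (i * 4 + 2) "",
          PySem.List.pyGetD fileContents (i * 4 + 3) ""]]) []

-- ===== PORT B =====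
-- pairs = [xs[i:i+2] for i in range(0, len(xs)-1, 2)]; then
-- [pairs[j] + pairs[j+1] for j in range(0, len(pairs)-1, 2)]
def formEvents_alt (fileContents : List String) : List (List String) :=
  let pairs := (PySem.List.pyRange 0 ((fileContents.length : Int) - 1) 2).map
      (fun i => PySem.List.slice fileContents (some i) (some (i + 2)))
  (PySem.List.pyRange 0 ((pairs.length : Int) - 1) 2).map
    (fun j => PySem.List.pyGetD pairs j [] ++ PySem.List.pyGetD pairs (j + 1) [])

-- ===== PRECONDITION & SPEC =====
def Spec_formEvents (fileContents : List String) (out : List (List String)) : Prop := out = formEvents_alt fileContents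
instance (fileContents : List String) (out : List (List String)) : Decidable (Spec_formEvents fileContents out) := by unfold Spec_formEvents; infer_instance

-- ===== CLAIM (what is proved, stated in full; the proofs are below) =====
def Claim_equal_formEvents : Prop := ∀ (fileContents : List String), Dom_formEvents fileContents → Spec_formEvents fileContents (formEvents fileContents)

-- ===== LEMMAS AND PROOFS =====

-- reference shapes used only by the proofs
def pvChunk2 : List String → List (List String)
  | a :: b :: rest => [a, b] :: pvChunk2 rest
  | _ => []

def pvMergeAdj : List (List String) → List (List String)
  | p :: q :: rest => (p ++ q) :: pvMergeAdj rest
  | _ => []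

def pvChunk4 : List String → List (List String)
  | a :: b :: c :: d :: rest => [a, b, c, d] :: pvChunk4 rest
  | _ => []

-- range(0, n-1, 2) is the even numbers below 2*(n/2)
theorem pvRange_two (n : Nat) :
    PySem.List.pyRange 0 ((n : Int) - 1) 2 = (List.range (n / 2)).map (fun k => ((2 * k : Nat) : Int)) := by
  rw [PySem.List.pyRange_of_pos 0 ((n : Int) - 1) (by norm_num)]
  have harg : (if (0 : Int) < (n : Int) - 1 then (((n : Int) - 1 - 0 + 2 - 1) / 2).toNat else 0) = n / 2 := by
    split_ifs with h <;> omega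
  rw [harg]
  exact List.map_congr_left fun k hk => by push_cast; ring

-- first comprehension = pairing adjacent elements
theorem stage1 (xs : List String) :
    (List.range (xs.length / 2)).map (fun k => (xs.drop (2 * k)).take 2) = pvChunk2 xs := by
  fun_induction pvChunk2 xs with
  | case1 a b rest ih =>
    have hlen : (a :: b :: rest).length / 2 = rest.length / 2 + 1 := by simp; omega
    rw [hlen, List.range_succ_eq_map, List.map_cons, List.map_map]
    refine congrArg₂ _ rfl ?_
    rw [← ih]
    exact List.map_congr_left fun k hk => by simp [Nat.mul_succ]
  | case2 x h =>
    have hz : x.length / 2 = 0 := by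
      rcases x with _ | ⟨a, _ | ⟨b, r⟩⟩
      · rfl
      · simp
      · exact (h a b r rfl).elim
    simp [hz]

-- second comprehension = concatenating adjacent pairs
theorem stage2 (ps : List (List String)) :
    (List.range (ps.length / 2)).map (fun j => ps.getD (2 * j) [] ++ ps.getD (2 * j + 1) []) = pvMergeAdj ps := by
  fun_induction pvMergeAdj ps with
  | case1 p q rest ih =>
    have hlen : (p :: q :: rest).length / 2 = rest.length / 2 + 1 := by simp; omega
    rw [hlen, List.range_succ_eq_map, List.map_cons, List.map_map]
    refine congrArg₂ _ rfl ?_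
    rw [← ih]
    exact List.map_congr_left fun k hk => by simp [Nat.mul_succ]
  | case2 x h =>
    have hz : x.length / 2 = 0 := by
      rcases x with _ | ⟨a, _ | ⟨b, r⟩⟩
      · rfl
      · simp
      · exact (h a b r rfl).elim
    simp [hz]

-- merging the adjacent pairs of the pairing is four-at-a-time chunking
theorem merge_chunk2 (xs : List String) : pvMergeAdj (pvChunk2 xs) = pvChunk4 xs := by
  fun_induction pvChunk4 xs with
  | case1 a b c d rest ih => simp [pvChunk2, pvMergeAdj, ih]
  | case2 x h =>
    rcases x with _ | ⟨a, _ | ⟨b, _ | ⟨c, _ | ⟨d, r⟩⟩⟩⟩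
    · rfl
    · rfl
    · rfl
    · rfl
    · exact (h a b c d r rfl).elim

-- B computes the four-at-a-time chunking
theorem alt_eq_chunk4 (xs : List String) : formEvents_alt xs = pvChunk4 xs := by
  have hpairs : (PySem.List.pyRange 0 ((xs.length : Int) - 1) 2).map
      (fun i => PySem.List.slice xs (some i) (some (i + 2))) = pvChunk2 xs := by
    rw [pvRange_two, List.map_map, ← stage1 xs]
    refine List.map_congr_left fun k hk => ?_
    simp only [Function.comp_apply]
    rw [show ((2 * k : Nat) : Int) + 2 = ((2 * k : Nat) : Int) + ((2 : Nat) : Int) from by norm_num,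
      PySem.List.slice_natCast_add]
  simp only [formEvents_alt]
  rw [hpairs, pvRange_two, List.map_map, ← merge_chunk2 xs, ← stage2 (pvChunk2 xs)]
  refine List.map_congr_left fun k hk => ?_
  simp only [Function.comp_apply]
  rw [show ((2 * k : Nat) : Int) + 1 = ((2 * k + 1 : Nat) : Int) from by push_cast; ring,
    PySem.List.pyGetD_natCast, PySem.List.pyGetD_natCast]

-- A's range-indexed fold, written as a map of the group at each index k < len/4
theorem formEvents_map (xs : List String) :
    formEvents xs =
      (List.range (xs.length / 4)).map
        (fun k => [xs.getD (4 * k) "", xs.getD (4 * k + 1) "", xs.getD (4 * k + 2) "", xs.getD (4 * k + 3) ""]) := by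
  unfold formEvents
  rw [PySem.List.foldl_append_singleton_eq_map]
  rw [show PySem.Int.floordiv (xs.length : Int) 4 = ((xs.length / 4 : Nat) : Int) from
    PySem.Int.floordiv_natCast xs.length 4]
  rw [PySem.List.pyRange_zero_nat, List.map_map]
  refine List.map_congr_left fun k hk => ?_
  have h0 : ((k : Int)) * 4 = ((4 * k : Nat) : Int) := by push_cast; ring
  have h1 : ((4 * k : Nat) : Int) + 1 = ((4 * k + 1 : Nat) : Int) := by push_cast; ring
  have h2 : ((4 * k : Nat) : Int) + 2 = ((4 * k + 2 : Nat) : Int) := by push_cast; ring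
  have h3 : ((4 * k : Nat) : Int) + 3 = ((4 * k + 3 : Nat) : Int) := by push_cast; ring
  simp only [Function.comp, h0, h1, h2, h3, PySem.List.pyGetD_natCast]

-- A's indexed groups are exactly the four-at-a-time chunking
theorem a_eq_chunk4 (xs : List String) :
    (List.range (xs.length / 4)).map
        (fun k => [xs.getD (4 * k) "", xs.getD (4 * k + 1) "", xs.getD (4 * k + 2) "", xs.getD (4 * k + 3) ""])
      = pvChunk4 xs := by
  fun_induction pvChunk4 xs with
  | case1 a b c d rest ih =>
    have hlen : (a :: b :: c :: d :: rest).length / 4 = rest.length / 4 + 1 := by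
      simp [List.length_cons]; omega
    rw [hlen, List.range_succ_eq_map, List.map_cons, List.map_map]
    refine congrArg₂ _ rfl ?_
    rw [← ih]
    refine List.map_congr_left fun k hk => ?_
    simp [Function.comp, Nat.mul_succ]
  | case2 x h =>
    have hz : x.length / 4 = 0 := by
      rcases x with _ | ⟨a, _ | ⟨b, _ | ⟨c, _ | ⟨d, r⟩⟩⟩⟩
      · rfl
      · simp
      · simp
      · simp
      · exact (h a b c d r rfl).elim
    simp [hz]

-- ===== VERDICT (by name: the statement is the Claim_ definition above) =====
theorem formEvents_spec : Claim_equal_formEvents := by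
  intro xs _
  unfold Spec_formEvents
  rw [formEvents_map, a_eq_chunk4, alt_eq_chunk4]
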